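-- pv_equiv track=rewrite | github.com/CDBiddulph/scaffold-learning | experiments/keep_crosswords_20250711_195402/scaffolds/1-6-2/scaffold.py | reconstruct_grid_from_clues
-- ===== SOURCE A (Python) =====
-- def reconstruct_grid_from_clues(original_grid, solved_across, solved_down):
--     """Reconstruct the grid from solved clues"""
--     height = len(original_grid)
--     width = len(original_grid[0]) if height > 0 else 0
--
--     # Initialize grid
--     filled_grid = [row[:] for row in original_grid]
--     for row in range(height):
--         for col in range(width):
--             if filled_grid[row][col] == '-':
--                 filled_grid[row][col] = ' '
--
--     # Find clue positions
--     across_info = {}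
--     down_info = {}
--     current_num = 1
--
--     for row in range(height):
--         for col in range(width):
--             if original_grid[row][col] == '.':
--                 continue
--
--             starts_across = (
--                 (col == 0 or original_grid[row][col - 1] == '.')
--                 and col + 1 < width
--                 and original_grid[row][col + 1] != '.'
--             )
--             starts_down = (
--                 (row == 0 or original_grid[row - 1][col] == '.')
--                 and row + 1 < height
--                 and original_grid[row + 1][col] != '.'
--             )
--
--             if starts_across or starts_down:
--                 if starts_across:
--                     length = get_word_length(original_grid, row, col, 'across')
--                     across_info[current_num] = (row, col, length)
--                 if starts_down:
--                     length = get_word_length(original_grid, row, col, 'down')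
--                     down_info[current_num] = (row, col, length)
--                 current_num += 1
--
--     # Fill in across answers
--     for clue_num, answer in solved_across.items():
--         if clue_num in across_info:
--             row, col, length = across_info[clue_num]
--             for i, letter in enumerate(answer):
--                 if i < length and col + i < width:
--                     filled_grid[row][col + i] = letter
--
--     # Fill in down answers
--     for clue_num, answer in solved_down.items():
--         if clue_num in down_info:
--             row, col, length = down_info[clue_num]
--             for i, letter in enumerate(answer):
--                 if i < length and row + i < height:
--                     filled_grid[row + i][col] = letter
--
--     return filled_grid
--
-- def get_word_length(grid, row, col, direction):
--     """Get the length of a word starting at (row, col) in the given direction"""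
--     height = len(grid)
--     width = len(grid[0]) if height > 0 else 0
--
--     length = 0
--     if direction == 'across':
--         for c in range(col, width):
--             if grid[row][c] == '.':
--                 break
--             length += 1
--     else:  # down
--         for r in range(row, height):
--             if grid[r][col] == '.':
--                 break
--             length += 1
--
--     return length
-- ===== SOURCE B (Python) =====
-- def reconstruct_grid_from_clues(original_grid, solved_across, solved_down):
--     """Reconstruct the grid from solved clues"""
--     height = len(original_grid)
--     width = len(original_grid[0]) if height > 0 else 0
--
--     # Initialize: copy, turning every '-' cell into a blank
--     filled_grid = [[' ' if cell == '-' else cell for cell in row]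
--                    for row in original_grid]
--
--     # Number the cells; keep only the START position of each numbered word
--     across_start = {}
--     down_start = {}
--     num = 1
--     for r in range(height):
--         for c in range(width):
--             if original_grid[r][c] == '.':
--                 continue
--             starts_across = (
--                 (c == 0 or original_grid[r][c - 1] == '.')
--                 and c + 1 < width
--                 and original_grid[r][c + 1] != '.'
--             )
--             starts_down = (
--                 (r == 0 or original_grid[r - 1][c] == '.')
--                 and r + 1 < height
--                 and original_grid[r + 1][c] != '.'
--             )
--             if starts_across or starts_down:
--                 if starts_across:
--                     across_start[num] = (r, c)
--                 if starts_down: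
--                     down_start[num] = (r, c)
--                 num += 1
--
--     # Fill: walk from the start cell until the edge or a block
--     for clue, answer in solved_across.items():
--         if clue in across_start:
--             r, c = across_start[clue]
--             for letter in answer:
--                 if c >= width or original_grid[r][c] == '.':
--                     break
--                 filled_grid[r][c] = letter
--                 c += 1
--
--     for clue, answer in solved_down.items():
--         if clue in down_start:
--             r, c = down_start[clue]
--             for letter in answer:
--                 if r >= height or original_grid[r][c] == '.':
--                     break
--                 filled_grid[r][c] = letter
--                 r += 1
--
--     return filled_grid
-- ===== Notes on version B (the rewrite author's own statement) =====
-- stated objective: simpler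
-- what changed: B drops the get_word_length helper entirely: the numbering pass stores only each word's start cell, the init pass is a per-cell comprehension instead of in-place index loops, and each answer is written by walking from the start cell until the grid edge or a '.' block instead of an index loop bounded by a precomputed length.
import Mathlib
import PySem

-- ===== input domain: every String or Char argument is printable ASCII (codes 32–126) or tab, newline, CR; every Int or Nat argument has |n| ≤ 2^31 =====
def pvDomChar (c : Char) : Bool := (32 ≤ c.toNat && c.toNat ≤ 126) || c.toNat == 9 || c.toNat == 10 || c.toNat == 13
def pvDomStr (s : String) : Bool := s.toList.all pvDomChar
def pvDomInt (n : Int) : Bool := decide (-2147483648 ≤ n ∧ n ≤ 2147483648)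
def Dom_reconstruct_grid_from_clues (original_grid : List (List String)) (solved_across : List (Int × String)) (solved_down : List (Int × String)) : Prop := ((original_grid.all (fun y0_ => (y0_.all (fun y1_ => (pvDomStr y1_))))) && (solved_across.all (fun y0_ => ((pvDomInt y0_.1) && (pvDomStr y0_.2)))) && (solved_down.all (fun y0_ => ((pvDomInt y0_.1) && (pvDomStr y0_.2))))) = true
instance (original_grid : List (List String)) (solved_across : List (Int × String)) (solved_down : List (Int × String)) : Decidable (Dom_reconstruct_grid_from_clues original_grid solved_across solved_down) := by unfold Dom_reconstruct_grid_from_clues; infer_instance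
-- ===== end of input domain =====

-- B replaces A's length-precomputing numbering pass and index-bounded fill by a starts-only
-- numbering pass and a walk-until-wall fill (objective: simpler — no get_word_length helper).
-- Python A mutates nothing observable (it copies the grid); the equivalence is about the return value.

-- ===== PORT A =====

-- grid[r][c] (total form; every use in either port is within bounds under Pre_)
def pvCell (g : List (List String)) (r c : Int) : String :=
  PySem.List.pyGetD (PySem.List.pyGetD g r []) c ""

-- grid[r][c] = v
def pvSetCell (g : List (List String)) (r c : Int) (v : String) : List (List String) :=
  PySem.List.pySetD g r (PySem.List.pySetD (PySem.List.pyGetD g r []) c v)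

-- the 'across' loop of get_word_length (count with break)
def pvWLAcross (g : List (List String)) (row col width : Int) : Int :=
  if col < width then
    (if pvCell g row col == "." then 0 else pvWLAcross g row (col + 1) width + 1)
  else 0
termination_by (width - col).toNat
decreasing_by omega

-- the 'down' loop of get_word_length
def pvWLDown (g : List (List String)) (row col height : Int) : Int :=
  if row < height then
    (if pvCell g row col == "." then 0 else pvWLDown g (row + 1) col height + 1)
  else 0
termination_by (height - row).toNat
decreasing_by omega

def get_word_length (grid : List (List String)) (row col : Int) (direction : String) : Int :=
  let height : Int := grid.length
  let width : Int := if height > 0 then ((PySem.List.pyGetD grid 0 []).length : Int) else 0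
  if direction == "across" then pvWLAcross grid row col width
  else pvWLDown grid row col height

-- the clue-numbering pass of A (state: across_info, down_info, current_num)
def pvNumA (og : List (List String)) (height width : Int) :
    PySem.Dict Int (Int × Int × Int) × PySem.Dict Int (Int × Int × Int) × Int :=
  (PySem.List.pyRange 0 height 1).foldl (fun st r =>
    (PySem.List.pyRange 0 width 1).foldl (fun st c =>
      if pvCell og r c == "." then st
      else
        let sa := (decide (c = 0) || (pvCell og r (c - 1) == ".")) &&
                  decide (c + 1 < width) && (pvCell og r (c + 1) != ".")
        let sd := (decide (r = 0) || (pvCell og (r - 1) c == ".")) &&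
                  decide (r + 1 < height) && (pvCell og (r + 1) c != ".")
        if sa || sd then
          ((if sa then st.1.insert st.2.2 (r, c, get_word_length og r c "across") else st.1),
           (if sd then st.2.1.insert st.2.2 (r, c, get_word_length og r c "down") else st.2.1),
           st.2.2 + 1)
        else st) st) (PySem.Dict.empty, PySem.Dict.empty, 1)

def reconstruct_grid_from_clues (original_grid : List (List String)) (solved_across : List (Int × String)) (solved_down : List (Int × String)) : List (List String) :=
  let height : Int := original_grid.length
  let width : Int := if height > 0 then ((PySem.List.pyGetD original_grid 0 []).length : Int) else 0
  -- initialize: copy, then '-' -> ' ' cell by cell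
  let filled1 := (PySem.List.pyRange 0 height 1).foldl (fun acc r =>
    (PySem.List.pyRange 0 width 1).foldl (fun acc c =>
      if pvCell acc r c == "-" then pvSetCell acc r c " " else acc) acc) original_grid
  let info := pvNumA original_grid height width
  -- fill in across answers
  let filled2 := solved_across.foldl (fun g kv =>
    match info.1.get? kv.1 with
    | some (r, c, len) =>
        (PySem.List.enumerate kv.2.toList 0).foldl (fun g p =>
          if p.1 < len ∧ c + p.1 < width then pvSetCell g r (c + p.1) (String.ofList [p.2]) else g) g
    | none => g) filled1
  -- fill in down answers
  let filled3 := solved_down.foldl (fun g kv =>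
    match info.2.1.get? kv.1 with
    | some (r, c, len) =>
        (PySem.List.enumerate kv.2.toList 0).foldl (fun g p =>
          if p.1 < len ∧ r + p.1 < height then pvSetCell g (r + p.1) c (String.ofList [p.2]) else g) g
    | none => g) filled2
  filled3

-- ===== PORT B =====

-- the starts-only numbering pass of B
def pvNumB (og : List (List String)) (height width : Int) :
    PySem.Dict Int (Int × Int) × PySem.Dict Int (Int × Int) × Int :=
  (PySem.List.pyRange 0 height 1).foldl (fun st r =>
    (PySem.List.pyRange 0 width 1).foldl (fun st c =>
      if pvCell og r c == "." then st
      else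
        let sa := (decide (c = 0) || (pvCell og r (c - 1) == ".")) &&
                  decide (c + 1 < width) && (pvCell og r (c + 1) != ".")
        let sd := (decide (r = 0) || (pvCell og (r - 1) c == ".")) &&
                  decide (r + 1 < height) && (pvCell og (r + 1) c != ".")
        if sa || sd then
          ((if sa then st.1.insert st.2.2 (r, c) else st.1),
           (if sd then st.2.1.insert st.2.2 (r, c) else st.2.1),
           st.2.2 + 1)
        else st) st) (PySem.Dict.empty, PySem.Dict.empty, 1)

-- walk right from (r, c) writing letters until the edge or a block
def pvWalkAcross (og : List (List String)) (g : List (List String)) (r c width : Int) :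
    List Char → List (List String)
  | [] => g
  | ch :: rest =>
      if width ≤ c ∨ pvCell og r c == "." then g
      else pvWalkAcross og (pvSetCell g r c (String.ofList [ch])) r (c + 1) width rest

-- walk down from (r, c)
def pvWalkDown (og : List (List String)) (g : List (List String)) (r c height : Int) :
    List Char → List (List String)
  | [] => g
  | ch :: rest =>
      if height ≤ r ∨ pvCell og r c == "." then g
      else pvWalkDown og (pvSetCell g r c (String.ofList [ch])) (r + 1) c height rest

def reconstruct_grid_from_clues_alt (original_grid : List (List String)) (solved_across : List (Int × String)) (solved_down : List (Int × String)) : List (List String) :=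
  let height : Int := original_grid.length
  let width : Int := if height > 0 then ((PySem.List.pyGetD original_grid 0 []).length : Int) else 0
  let filled0 := original_grid.map (fun row => row.map (fun cell => if cell == "-" then " " else cell))
  let info := pvNumB original_grid height width
  let filled2 := solved_across.foldl (fun g kv =>
    match info.1.get? kv.1 with
    | some (r, c) => pvWalkAcross original_grid g r c width kv.2.toList
    | none => g) filled0
  let filled3 := solved_down.foldl (fun g kv =>
    match info.2.1.get? kv.1 with
    | some (r, c) => pvWalkDown original_grid g r c height kv.2.toList
    | none => g) filled2
  filled3

-- ===== PRECONDITION & SPEC =====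
-- Pre_ excludes ragged grids: rows shorter than the first row make Python A raise IndexError,
-- and on rows longer than the first row A's width-bounded loops silently skip the trailing
-- cells (an artefact of computing width from row 0), while B treats every row uniformly.
def Pre_reconstruct_grid_from_clues (original_grid : List (List String)) (solved_across : List (Int × String)) (solved_down : List (Int × String)) : Prop :=
  ∀ row ∈ original_grid, row.length = (original_grid.headD []).length
instance (original_grid : List (List String)) (solved_across : List (Int × String)) (solved_down : List (Int × String)) : Decidable (Pre_reconstruct_grid_from_clues original_grid solved_across solved_down) := by unfold Pre_reconstruct_grid_from_clues; infer_instance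

def pvWitness_reconstruct_grid_from_clues : List (List String) × (List (Int × String)) × (List (Int × String)) :=
  ([["-", "-", "."], ["-", "-", "-"], [".", "-", "-"]], [((1 : Int), "AB")], [((2 : Int), "XYZ")])

def Spec_reconstruct_grid_from_clues (original_grid : List (List String)) (solved_across : List (Int × String)) (solved_down : List (Int × String)) (out : List (List String)) : Prop := out = reconstruct_grid_from_clues_alt original_grid solved_across solved_down
instance (original_grid : List (List String)) (solved_across : List (Int × String)) (solved_down : List (Int × String)) (out : List (List String)) : Decidable (Spec_reconstruct_grid_from_clues original_grid solved_across solved_down out) := by unfold Spec_reconstruct_grid_from_clues; infer_instance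

-- ===== CLAIM (what is proved, stated in full; the proofs are below) =====
def Claim_equal_reconstruct_grid_from_clues : Prop := ∀ (original_grid : List (List String)) (solved_across : List (Int × String)) (solved_down : List (Int × String)), Dom_reconstruct_grid_from_clues original_grid solved_across solved_down → Pre_reconstruct_grid_from_clues original_grid solved_across solved_down → Spec_reconstruct_grid_from_clues original_grid solved_across solved_down (reconstruct_grid_from_clues original_grid solved_across solved_down)

-- ===== LEMMAS AND PROOFS =====

-- generic: a foldl over the same list preserves a relation between two states
theorem pvFoldlRel {α σ τ : Type} (R : σ → τ → Prop) (f : σ → α → σ) (g : τ → α → τ)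
    (hstep : ∀ s t a, R s t → R (f s a) (g t a)) :
    ∀ (l : List α) (s : σ) (t : τ), R s t → R (l.foldl f s) (l.foldl g t) := by
  intro l
  induction l with
  | nil => intro s t h; exact h
  | cons x xs ih => intro s t h; exact ih _ _ (hstep _ _ _ h)

-- value-mapped dictionary
def pvMapVal {ν μ : Type} (f : ν → μ) (d : PySem.Dict Int ν) : PySem.Dict Int μ :=
  ⟨d.items.map (fun p => (p.1, f p.2))⟩

theorem pvMapVal_contains {ν μ : Type} (f : ν → μ) (d : PySem.Dict Int ν) (k : Int) :
    (pvMapVal f d).contains k = d.contains k := by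
  simp [pvMapVal, PySem.Dict.contains, List.any_map, Function.comp_def]

theorem pvMapVal_insert {ν μ : Type} (f : ν → μ) (d : PySem.Dict Int ν) (k : Int) (v : ν) :
    pvMapVal f (d.insert k v) = (pvMapVal f d).insert k (f v) := by
  unfold PySem.Dict.insert
  rw [pvMapVal_contains]
  by_cases h : d.contains k = true
  · simp only [h, if_true, pvMapVal, List.map_map]
    congr 1
    apply List.map_congr_left
    intro p _
    by_cases hp : p.1 = k <;> simp [hp]
  · simp [h, pvMapVal]

theorem pvMapVal_get? {ν μ : Type} (f : ν → μ) (d : PySem.Dict Int ν) (k : Int) :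
    (pvMapVal f d).get? k = (d.get? k).map f := by
  simp [pvMapVal, PySem.Dict.get?, List.find?_map, Function.comp_def]

-- A's numbering pass carries the same dictionaries as B's, with lengths attached to the values
theorem pvNum_rel (og : List (List String)) (h w : Int) :
    (pvNumA og h w).1 = pvMapVal (fun p => (p.1, p.2, get_word_length og p.1 p.2 "across")) (pvNumB og h w).1 ∧
    (pvNumA og h w).2.1 = pvMapVal (fun p => (p.1, p.2, get_word_length og p.1 p.2 "down")) (pvNumB og h w).2.1 ∧
    (pvNumA og h w).2.2 = (pvNumB og h w).2.2 := by
  unfold pvNumA pvNumB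
  apply pvFoldlRel (R := fun (s : PySem.Dict Int (Int × Int × Int) × PySem.Dict Int (Int × Int × Int) × Int)
      (t : PySem.Dict Int (Int × Int) × PySem.Dict Int (Int × Int) × Int) =>
    s.1 = pvMapVal (fun p => (p.1, p.2, get_word_length og p.1 p.2 "across")) t.1 ∧
    s.2.1 = pvMapVal (fun p => (p.1, p.2, get_word_length og p.1 p.2 "down")) t.2.1 ∧
    s.2.2 = t.2.2)
  · intro s t r hst
    apply pvFoldlRel (R := fun (s : PySem.Dict Int (Int × Int × Int) × PySem.Dict Int (Int × Int × Int) × Int)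
        (t : PySem.Dict Int (Int × Int) × PySem.Dict Int (Int × Int) × Int) =>
      s.1 = pvMapVal (fun p => (p.1, p.2, get_word_length og p.1 p.2 "across")) t.1 ∧
      s.2.1 = pvMapVal (fun p => (p.1, p.2, get_word_length og p.1 p.2 "down")) t.2.1 ∧
      s.2.2 = t.2.2)
    · intro s t c hst'
      obtain ⟨a1, a2, a3⟩ := s
      obtain ⟨b1, b2, b3⟩ := t
      obtain ⟨h1, h2, h3⟩ := hst'
      dsimp only at h1 h2 h3
      subst h1; subst h2; subst h3
      by_cases hdot : (pvCell og r c == ".") = true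
      · simp [hdot]
      · by_cases hsa : ((decide (c = 0) || pvCell og r (c - 1) == ".") && decide (c + 1 < w) && pvCell og r (c + 1) != ".") = true <;>
          by_cases hsd : ((decide (r = 0) || pvCell og (r - 1) c == ".") && decide (r + 1 < h) && pvCell og (r + 1) c != ".") = true <;>
          simp [hdot, hsa, hsd, pvMapVal_insert]
    · exact hst
  · exact ⟨rfl, rfl, rfl⟩

theorem pvWLAcross_nonneg (g : List (List String)) (row width : Int) :
    ∀ (col : Int), 0 ≤ pvWLAcross g row col width := by
  intro col
  induction col using pvWLAcross.induct (g := g) (row := row) (width := width) with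
  | case1 x hx hdot => rw [pvWLAcross, if_pos hx, if_pos hdot]
  | case2 x hx hdot ih => rw [pvWLAcross, if_pos hx, if_neg hdot]; omega
  | case3 x hx => rw [pvWLAcross, if_neg hx]

theorem pvWLAcross_lt (g : List (List String)) (row width : Int) :
    ∀ (k : Nat) (col : Int), (k : Int) < pvWLAcross g row col width →
      col + k < width ∧ ¬ (pvCell g row (col + k) == ".") = true := by
  intro k
  induction k with
  | zero =>
    intro col hk
    rw [pvWLAcross] at hk
    by_cases h1 : col < width
    · rw [if_pos h1] at hk
      by_cases h2 : (pvCell g row col == ".") = true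
      · rw [if_pos h2] at hk; omega
      · refine ⟨by omega, ?_⟩
        simpa using h2
    · rw [if_neg h1] at hk; omega
  | succ n ih =>
    intro col hk
    rw [pvWLAcross] at hk
    by_cases h1 : col < width
    · rw [if_pos h1] at hk
      by_cases h2 : (pvCell g row col == ".") = true
      · rw [if_pos h2] at hk; omega
      · rw [if_neg h2] at hk
        have := ih (col + 1) (by push_cast at hk ⊢; omega)
        refine ⟨by push_cast at this ⊢; omega, ?_⟩
        have e : col + ((n : Nat) + 1 : Nat) = col + 1 + (n : Nat) := by push_cast; omega
        rw [e]
        exact this.2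
    · rw [if_neg h1] at hk; omega

theorem pvWLAcross_stop (g : List (List String)) (row width : Int) :
    ∀ (col : Int),
      width ≤ col + pvWLAcross g row col width ∨
      (pvCell g row (col + pvWLAcross g row col width) == ".") = true := by
  intro col
  induction col using pvWLAcross.induct (g := g) (row := row) (width := width) with
  | case1 x hx hdot => rw [pvWLAcross, if_pos hx, if_pos hdot]; right; simpa using hdot
  | case2 x hx hdot ih =>
    rw [pvWLAcross, if_pos hx, if_neg hdot]
    rcases ih with h | h
    · left; omega
    · right
      have e : x + (pvWLAcross g row (x + 1) width + 1) = x + 1 + pvWLAcross g row (x + 1) width := by omega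
      rw [e]; exact h
  | case3 x hx => rw [pvWLAcross, if_neg hx]; left; omega

-- A's index-bounded fill writes nothing once the index has reached the word length
theorem pvFillAcross_overshoot (og : List (List String)) (r c width len : Int) :
    ∀ (letters : List Char) (n : Int) (g : List (List String)), len ≤ n →
      (PySem.List.enumerate letters n).foldl (fun g p =>
        if p.1 < len ∧ c + p.1 < width then pvSetCell g r (c + p.1) (String.ofList [p.2]) else g) g = g := by
  intro letters
  induction letters with
  | nil => intro n g _; simp [PySem.List.enumerate_nil]
  | cons ch rest ih =>
    intro n g hn
    rw [PySem.List.enumerate_cons, List.foldl_cons]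
    rw [if_neg (by omega)]
    exact ih (n + 1) g (by omega)

-- A's index-bounded fill of one across answer is B's walk
theorem pvFillAcross_eq_walk (og : List (List String)) (r c width : Int) :
    ∀ (letters : List Char) (n : Nat) (g : List (List String)),
      (n : Int) ≤ pvWLAcross og r c width →
      (PySem.List.enumerate letters n).foldl (fun g p =>
        if p.1 < pvWLAcross og r c width ∧ c + p.1 < width then
          pvSetCell g r (c + p.1) (String.ofList [p.2]) else g) g
      = pvWalkAcross og g r (c + n) width letters := by
  intro letters
  induction letters with
  | nil => intro n g _; simp [PySem.List.enumerate_nil, pvWalkAcross]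
  | cons ch rest ih =>
    intro n g hn
    rw [PySem.List.enumerate_cons, List.foldl_cons, pvWalkAcross]
    by_cases hlt : (n : Int) < pvWLAcross og r c width
    · obtain ⟨hw, hdot⟩ := pvWLAcross_lt og r width n c hlt
      have hstop : ¬ (width ≤ c + (n : Int) ∨ (pvCell og r (c + (n : Int)) == ".") = true) := by
        rintro (h1 | h1)
        · omega
        · exact hdot h1
      rw [if_neg hstop, if_pos ⟨hlt, hw⟩]
      have := ih (n + 1) (pvSetCell g r (c + (n : Int)) (String.ofList [ch])) (by push_cast; omega)
      push_cast at this
      have e : c + (n : Int) + 1 = c + ((n : Int) + 1) := by ring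
      rw [e]
      exact this
    · have hstop : width ≤ c + (n : Int) ∨ (pvCell og r (c + (n : Int)) == ".") = true := by
        rcases pvWLAcross_stop og r width c with h | h
        · left; omega
        · right
          have hn' : (n : Int) = pvWLAcross og r c width := by omega
          rw [hn']; exact h
      rw [if_pos hstop, if_neg (fun hA => absurd hA.1 hlt)]
      exact pvFillAcross_overshoot og r c width _ rest ((n : Int) + 1) g (by omega)

theorem pvWLDown_nonneg (g : List (List String)) (col height : Int) :
    ∀ (row : Int), 0 ≤ pvWLDown g row col height := by
  intro row
  induction row using pvWLDown.induct (g := g) (col := col) (height := height) with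
  | case1 x hx hdot => rw [pvWLDown, if_pos hx, if_pos hdot]
  | case2 x hx hdot ih => rw [pvWLDown, if_pos hx, if_neg hdot]; omega
  | case3 x hx => rw [pvWLDown, if_neg hx]

theorem pvWLDown_lt (g : List (List String)) (col height : Int) :
    ∀ (k : Nat) (row : Int), (k : Int) < pvWLDown g row col height →
      row + k < height ∧ ¬ (pvCell g (row + k) col == ".") = true := by
  intro k
  induction k with
  | zero =>
    intro row hk
    rw [pvWLDown] at hk
    by_cases h1 : row < height
    · rw [if_pos h1] at hk
      by_cases h2 : (pvCell g row col == ".") = true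
      · rw [if_pos h2] at hk; omega
      · refine ⟨by omega, ?_⟩
        simpa using h2
    · rw [if_neg h1] at hk; omega
  | succ n ih =>
    intro row hk
    rw [pvWLDown] at hk
    by_cases h1 : row < height
    · rw [if_pos h1] at hk
      by_cases h2 : (pvCell g row col == ".") = true
      · rw [if_pos h2] at hk; omega
      · rw [if_neg h2] at hk
        have := ih (row + 1) (by push_cast at hk ⊢; omega)
        refine ⟨by push_cast at this ⊢; omega, ?_⟩
        have e : row + ((n : Nat) + 1 : Nat) = row + 1 + (n : Nat) := by push_cast; omega
        rw [e]
        exact this.2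
    · rw [if_neg h1] at hk; omega

theorem pvWLDown_stop (g : List (List String)) (col height : Int) :
    ∀ (row : Int),
      height ≤ row + pvWLDown g row col height ∨
      (pvCell g (row + pvWLDown g row col height) col == ".") = true := by
  intro row
  induction row using pvWLDown.induct (g := g) (col := col) (height := height) with
  | case1 x hx hdot => rw [pvWLDown, if_pos hx, if_pos hdot]; right; simpa using hdot
  | case2 x hx hdot ih =>
    rw [pvWLDown, if_pos hx, if_neg hdot]
    rcases ih with h | h
    · left; omega
    · right
      have e : x + (pvWLDown g (x + 1) col height + 1) = x + 1 + pvWLDown g (x + 1) col height := by omega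
      rw [e]; exact h
  | case3 x hx => rw [pvWLDown, if_neg hx]; left; omega

theorem pvFillDown_overshoot (og : List (List String)) (r c height len : Int) :
    ∀ (letters : List Char) (n : Int) (g : List (List String)), len ≤ n →
      (PySem.List.enumerate letters n).foldl (fun g p =>
        if p.1 < len ∧ r + p.1 < height then pvSetCell g (r + p.1) c (String.ofList [p.2]) else g) g = g := by
  intro letters
  induction letters with
  | nil => intro n g _; simp [PySem.List.enumerate_nil]
  | cons ch rest ih =>
    intro n g hn
    rw [PySem.List.enumerate_cons, List.foldl_cons]
    rw [if_neg (by omega)]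
    exact ih (n + 1) g (by omega)

-- A's index-bounded fill of one down answer is B's walk
theorem pvFillDown_eq_walk (og : List (List String)) (r c height : Int) :
    ∀ (letters : List Char) (n : Nat) (g : List (List String)),
      (n : Int) ≤ pvWLDown og r c height →
      (PySem.List.enumerate letters n).foldl (fun g p =>
        if p.1 < pvWLDown og r c height ∧ r + p.1 < height then
          pvSetCell g (r + p.1) c (String.ofList [p.2]) else g) g
      = pvWalkDown og g (r + n) c height letters := by
  intro letters
  induction letters with
  | nil => intro n g _; simp [PySem.List.enumerate_nil, pvWalkDown]
  | cons ch rest ih =>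
    intro n g hn
    rw [PySem.List.enumerate_cons, List.foldl_cons, pvWalkDown]
    by_cases hlt : (n : Int) < pvWLDown og r c height
    · obtain ⟨hw, hdot⟩ := pvWLDown_lt og c height n r hlt
      have hstop : ¬ (height ≤ r + (n : Int) ∨ (pvCell og (r + (n : Int)) c == ".") = true) := by
        rintro (h1 | h1)
        · omega
        · exact hdot h1
      rw [if_neg hstop, if_pos ⟨hlt, hw⟩]
      have := ih (n + 1) (pvSetCell g (r + (n : Int)) c (String.ofList [ch])) (by push_cast; omega)
      push_cast at this
      have e : r + (n : Int) + 1 = r + ((n : Int) + 1) := by ring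
      rw [e]
      exact this
    · have hstop : height ≤ r + (n : Int) ∨ (pvCell og (r + (n : Int)) c == ".") = true := by
        rcases pvWLDown_stop og c height r with h | h
        · left; omega
        · right
          have hn' : (n : Int) = pvWLDown og r c height := by omega
          rw [hn']; exact h
      rw [if_pos hstop, if_neg (fun hA => absurd hA.1 hlt)]
      exact pvFillDown_overshoot og r c height _ rest ((n : Int) + 1) g (by omega)

theorem pvSetD_natCast {α : Type} (xs : List α) (n : Nat) (v : α) (h : n < xs.length) :
    PySem.List.pySetD xs (n : Int) v = xs.set n v := by
  simp [PySem.List.pySetD, PySem.List.pySet?_natCast xs n v h]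

-- one row of A's initialization loop, cell by cell
theorem pvSetD_toNat {α : Type} (xs : List α) (i : Int) (v : α) (h0 : 0 ≤ i)
    (h : i.toNat < xs.length) : PySem.List.pySetD xs i v = xs.set i.toNat v := by
  have e : i = ((i.toNat : Nat) : Int) := by omega
  rw [e, pvSetD_natCast _ _ _ h]
  congr 1

theorem pvInitRow (row : List String) (G : List (List String)) (r : Int)
    (hr0 : 0 ≤ r) (hrG : r.toNat < G.length) (hrow : PySem.List.pyGetD G r [] = row) :
    ∀ (k : Nat), k ≤ row.length →
      (PySem.List.pyRange 0 (k : Int) 1).foldl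
        (fun acc c => if pvCell acc r c == "-" then pvSetCell acc r c " " else acc) G
      = G.set r.toNat ((row.take k).map (fun cell => if cell == "-" then " " else cell) ++ row.drop k) := by
  have hget : G[r.toNat] = row := by
    rw [PySem.List.pyGetD_eq_getElem G [] hr0 (by omega)] at hrow
    exact hrow
  intro k
  induction k with
  | zero =>
    intro _
    rw [PySem.List.pyRange_one_eq_nil (by omega)]
    simp only [List.foldl_nil, List.take_zero, List.map_nil, List.drop_zero, List.nil_append]
    rw [← hget]
    exact (List.set_getElem_self (by simpa using hrG)).symm
  | succ k ih =>
    intro hk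
    have hk1 : k < row.length := by omega
    have hrng : PySem.List.pyRange 0 ((k + 1 : Nat) : Int) 1
        = PySem.List.pyRange 0 (k : Nat) 1 ++ [(k : Int)] := by
      push_cast
      exact PySem.List.pyRange_one_succ_right (by omega)
    rw [hrng, List.foldl_append, ih (by omega)]
    set pre := (row.take k).map (fun cell => if cell == "-" then " " else cell) with hpre
    have hprelen : pre.length = k := by
      simp [hpre, List.length_take, Nat.min_eq_left (le_of_lt hk1)]
    have hGk : (G.set r.toNat (pre ++ row.drop k))[r.toNat]'(by simpa using hrG) = pre ++ row.drop k :=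
      List.getElem_set_self (by simpa using hrG)
    have hdropk : row.drop k = row[k] :: row.drop (k + 1) := List.drop_eq_getElem_cons hk1
    have hcell : pvCell (G.set r.toNat (pre ++ row.drop k)) r (k : Int) = row[k] := by
      unfold pvCell
      rw [PySem.List.pyGetD_eq_getElem _ [] hr0 (by simp; omega), hGk]
      rw [PySem.List.pyGetD_natCast]
      rw [hdropk]
      rw [List.getD_eq_getElem?_getD, List.getElem?_append_right (by omega)]
      simp [hprelen, List.getElem?_eq_getElem hk1]
    have htake : (row.take (k + 1)).map (fun cell => if cell == "-" then " " else cell)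
        = pre ++ [if row[k] == "-" then " " else row[k]] := by
      rw [List.take_succ_eq_append_getElem hk1, List.map_append]
      simp [hpre]
    simp only [List.foldl_cons, List.foldl_nil]
    by_cases hdash : (row[k] == "-") = true
    · rw [if_pos (by rw [hcell]; exact hdash)]
      unfold pvSetCell
      rw [PySem.List.pyGetD_eq_getElem _ [] hr0 (by simp; omega), hGk]
      have hsetrow : PySem.List.pySetD (pre ++ row.drop k) ((k : Nat) : Int) " "
          = pre ++ " " :: row.drop (k + 1) := by
        rw [pvSetD_natCast _ _ _ (by simp [hprelen]; omega), hdropk]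
        simp [hprelen]
        rw [hdropk]
        rfl
      rw [hsetrow, pvSetD_toNat _ r _ hr0 (by simpa using hrG)]
      rw [List.set_set, htake]
      simp [hdash]
    · rw [if_neg (by rw [hcell]; exact hdash)]
      rw [htake, hdropk]
      congr 1
      simp [hdash]

-- the whole initialization pass: on a rectangular grid it is a per-cell map
theorem pvInit_eq (og : List (List String)) (L : Nat) (hL : ∀ row ∈ og, row.length = L) :
    ∀ (m : Nat), m ≤ og.length →
      (PySem.List.pyRange 0 (m : Int) 1).foldl (fun acc r =>
        (PySem.List.pyRange 0 (L : Int) 1).foldl (fun acc c =>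
          if pvCell acc r c == "-" then pvSetCell acc r c " " else acc) acc) og
      = (og.take m).map (fun row => row.map (fun cell => if cell == "-" then " " else cell)) ++ og.drop m := by
  intro m
  induction m with
  | zero =>
    intro _
    have h0 : PySem.List.pyRange 0 ((0 : Nat) : Int) 1 = [] := PySem.List.pyRange_one_eq_nil (by omega)
    rw [h0]
    simp
  | succ m ih =>
    intro hm
    have hm1 : m < og.length := by omega
    have hrng : PySem.List.pyRange 0 ((m + 1 : Nat) : Int) 1
        = PySem.List.pyRange 0 (m : Nat) 1 ++ [(m : Int)] := by
      push_cast
      exact PySem.List.pyRange_one_succ_right (by omega)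
    rw [hrng, List.foldl_append, ih (by omega)]
    simp only [List.foldl_cons, List.foldl_nil]
    set pre := (og.take m).map (fun row => row.map (fun cell => if cell == "-" then " " else cell)) with hpre
    have hprelen : pre.length = m := by
      simp [hpre, Nat.min_eq_left (le_of_lt hm1)]
    have hdropm : og.drop m = og[m] :: og.drop (m + 1) := List.drop_eq_getElem_cons hm1
    have hrowget : PySem.List.pyGetD (pre ++ og.drop m) ((m : Nat) : Int) [] = og[m] := by
      rw [PySem.List.pyGetD_natCast, hdropm]
      rw [List.getD_eq_getElem?_getD, List.getElem?_append_right (by omega)]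
      simp [hprelen, List.getElem?_eq_getElem hm1]
    have hlen : og[m].length = L := hL _ (List.getElem_mem hm1)
    have := pvInitRow og[m] (pre ++ og.drop m) ((m : Nat) : Int) (by omega)
      (by simp [hprelen]; omega) hrowget L (le_of_eq hlen.symm)
    rw [← hlen] at this
    rw [List.take_length, List.drop_length, List.append_nil] at this
    rw [hlen] at this
    rw [this]
    have htoNat : ((m : Nat) : Int).toNat = m := by omega
    rw [htoNat, hdropm]
    have hset : (pre ++ og[m] :: og.drop (m + 1)).set m
        (og[m].map (fun cell => if cell == "-" then " " else cell))
        = pre ++ (og[m].map (fun cell => if cell == "-" then " " else cell)) :: og.drop (m + 1) := by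
      simp [hprelen]
      rw [hdropm]
      rfl
    rw [hset]
    rw [List.take_succ_eq_append_getElem hm1, List.map_append]
    simp [hpre]

theorem pv_main (og : List (List String)) (sa sd : List (Int × String))
    (hpre : ∀ row ∈ og, row.length = (og.headD []).length) :
    reconstruct_grid_from_clues og sa sd = reconstruct_grid_from_clues_alt og sa sd := by
  dsimp only [reconstruct_grid_from_clues, reconstruct_grid_from_clues_alt]
  set H : Int := (og.length : Int) with hH
  set W : Int := if H > 0 then ((PySem.List.pyGetD og 0 []).length : Int) else 0 with hWdef
  set L : Nat := (og.headD []).length with hL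
  have hW : W = (L : Int) := by
    cases og with
    | nil => simp [hWdef, hH, hL]
    | cons r0 rest => simp [hWdef, hH, hL, PySem.List.pyGetD_zero_cons]
  -- the initialization pass
  have hinit : (PySem.List.pyRange 0 H 1).foldl (fun acc r =>
      (PySem.List.pyRange 0 W 1).foldl (fun acc c =>
        if pvCell acc r c == "-" then pvSetCell acc r c " " else acc) acc) og
      = og.map (fun row => row.map (fun cell => if cell == "-" then " " else cell)) := by
    rw [hW, hH]
    have := pvInit_eq og L hpre og.length le_rfl
    rw [List.take_length, List.drop_length, List.append_nil] at this
    exact this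
  -- the numbering passes
  obtain ⟨hA, hD, _⟩ := pvNum_rel og H W
  -- one across answer
  have hstepA : ∀ (g : List (List String)) (kv : Int × String),
      (match (pvNumA og H W).1.get? kv.1 with
       | some (r, c, len) =>
           (PySem.List.enumerate kv.2.toList 0).foldl (fun g p =>
             if p.1 < len ∧ c + p.1 < W then pvSetCell g r (c + p.1) (String.ofList [p.2]) else g) g
       | none => g)
      = (match (pvNumB og H W).1.get? kv.1 with
         | some (r, c) => pvWalkAcross og g r c W kv.2.toList
         | none => g) := by
    intro g kv
    rw [hA, pvMapVal_get?]
    cases hb : (pvNumB og H W).1.get? kv.1 with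
    | none => rfl
    | some p =>
      obtain ⟨r, c⟩ := p
      dsimp only [Option.map_some]
      have hgwl : get_word_length og r c "across" = pvWLAcross og r c W := by
        simp [get_word_length, hWdef, hH]
      rw [hgwl]
      have h0 : ((0 : Nat) : Int) ≤ pvWLAcross og r c W := by
        simpa using pvWLAcross_nonneg og r W c
      have := pvFillAcross_eq_walk og r c W kv.2.toList 0 g h0
      simpa using this
  -- one down answer
  have hstepD : ∀ (g : List (List String)) (kv : Int × String),
      (match (pvNumA og H W).2.1.get? kv.1 with
       | some (r, c, len) =>
           (PySem.List.enumerate kv.2.toList 0).foldl (fun g p =>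
             if p.1 < len ∧ r + p.1 < H then pvSetCell g (r + p.1) c (String.ofList [p.2]) else g) g
       | none => g)
      = (match (pvNumB og H W).2.1.get? kv.1 with
         | some (r, c) => pvWalkDown og g r c H kv.2.toList
         | none => g) := by
    intro g kv
    rw [hD, pvMapVal_get?]
    cases hb : (pvNumB og H W).2.1.get? kv.1 with
    | none => rfl
    | some p =>
      obtain ⟨r, c⟩ := p
      dsimp only [Option.map_some]
      have hgwl : get_word_length og r c "down" = pvWLDown og r c H := by
        simp [get_word_length, hH]
      rw [hgwl]
      have h0 : ((0 : Nat) : Int) ≤ pvWLDown og r c H := by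
        simpa using pvWLDown_nonneg og c H r
      have := pvFillDown_eq_walk og r c H kv.2.toList 0 g h0
      simpa using this
  rw [hinit]
  rw [PySem.List.foldl_congr_mem sa _ _ _ (fun acc kv _ => hstepA acc kv)]
  rw [PySem.List.foldl_congr_mem sd _ _ _ (fun acc kv _ => hstepD acc kv)]

-- ===== VERDICT (by name: the statement is the Claim_ definition above) =====
theorem reconstruct_grid_from_clues_spec : Claim_equal_reconstruct_grid_from_clues := by
  intro og sa sd _ hpre
  show reconstruct_grid_from_clues og sa sd = reconstruct_grid_from_clues_alt og sa sd
  exact pv_main og sa sd hpre
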